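-- pv_equiv track=rewrite | github.com/jay-thakur/geeksforgeeks_py | practice/Basic/sum_triangle_for_given_array.py | sum_triangle_for_given_array
-- ===== SOURCE A (Python) =====
-- def sum_triangle_for_given_array(arr, size):
--     while size:
--         temp = []
--         for i in range(size - 1):
--             temp.append(arr[i] + arr[i + 1])
--         for i in temp[::-1]:
--             arr.insert(0, i)
--         size = size - 1
--     return arr
-- ===== SOURCE B (Python) =====
-- def sum_triangle_for_given_array(arr, size):
--     # Closed form: level L entry j is sum_k C(L,k)*arr[j+k]; emit levels top-down,
--     # computing binomial weights by the multiplicative formula instead of iterating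
--     # adjacent pair sums. Does not mutate arr (return value equivalence).
--     out = []
--     for lev in range(size - 1, 0, -1):
--         coef = [1]
--         for i in range(1, lev + 1):
--             coef.append(coef[-1] * (lev - i + 1) // i)
--         for j in range(size - lev):
--             s = 0
--             for k in range(lev + 1):
--                 s += coef[k] * arr[j + k]
--             out.append(s)
--     return out + arr
-- ===== Notes on version B (the rewrite author's own statement) =====
-- stated objective: alternative
-- what changed: B computes every triangle entry directly by the binomial closed form (level L, offset j gives sum_k C(L,k)*arr[j+k], with the weights built by the multiplicative formula), instead of A's iterated adjacent-pair-sum rows built by repeated arr.insert(0, ...); it trades A's list shifting for per-entry weighted sums.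
-- outside the precondition, e.g. on sum_triangle_for_given_array([1, 2], -1): A does not finish within the time limit, B returns [1, 2]; on sum_triangle_for_given_array([1, 2], 3): A raises IndexError, B raises IndexError
import Mathlib
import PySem

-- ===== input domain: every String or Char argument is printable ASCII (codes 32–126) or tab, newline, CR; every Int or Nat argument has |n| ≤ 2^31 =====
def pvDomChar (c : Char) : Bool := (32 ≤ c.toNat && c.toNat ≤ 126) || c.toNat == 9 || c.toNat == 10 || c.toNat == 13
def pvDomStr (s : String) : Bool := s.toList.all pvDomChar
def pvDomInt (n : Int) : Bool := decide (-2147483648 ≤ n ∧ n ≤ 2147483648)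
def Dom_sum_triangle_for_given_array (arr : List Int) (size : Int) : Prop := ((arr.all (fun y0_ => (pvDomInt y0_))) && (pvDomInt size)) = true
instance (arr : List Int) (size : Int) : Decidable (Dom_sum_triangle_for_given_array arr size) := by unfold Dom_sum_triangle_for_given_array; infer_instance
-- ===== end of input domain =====

-- B computes each triangle entry by the binomial closed form (level L, offset j ↦ Σ_k C(L,k)·arr[j+k],
-- weights by the multiplicative formula) instead of A's iterated adjacent-pair sums with arr.insert(0, …)
-- (an alternative algorithm, similar cost). Return-value equivalence only: A mutates arr in place, B does not.

-- ===== PORT A =====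
-- 'while size:' loop; fuel = size.toNat (a loop counter, not an index; for size < 0 the Python
-- loop never terminates, which Pre_ excludes).  Each pass: temp = [arr[i]+arr[i+1] for i in
-- range(size-1)], then 'for i in temp[::-1]: arr.insert(0, i)'.
def pvLoopA (arr : List Int) : Nat → List Int
  | 0 => arr
  | Nat.succ k =>
    let temp := (PySem.List.pyRange 0 ((k : Int) + 1 - 1) 1).map
      (fun i => PySem.List.pyGetD arr i 0 + PySem.List.pyGetD arr (i + 1) 0)
    let arr' := ((PySem.List.slice? temp none none (-1)).getD []).foldl
      (fun a i => PySem.List.insert a 0 i) arr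
    pvLoopA arr' k

def sum_triangle_for_given_array (arr : List Int) (size : Int) : List Int :=
  pvLoopA arr size.toNat

-- ===== PORT B =====
-- coef = [1]; for i in range(1, lev+1): coef.append(coef[-1] * (lev - i + 1) // i)
def pvCoefB (lev : Int) : List Int :=
  (PySem.List.pyRange 1 (lev + 1) 1).foldl
    (fun coef i =>
      coef ++ [PySem.Int.floordiv (PySem.List.pyGetD coef (-1) 0 * (lev - i + 1)) i]) [1]

-- for lev in range(size-1, 0, -1): build coef, then for j: accumulate the dot product, append
def sum_triangle_for_given_array_alt (arr : List Int) (size : Int) : List Int :=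
  ((PySem.List.pyRange (size - 1) 0 (-1)).foldl
    (fun out lev =>
      let coef := pvCoefB lev
      (PySem.List.pyRange 0 (size - lev) 1).foldl
        (fun out j =>
          out ++ [(PySem.List.pyRange 0 (lev + 1) 1).foldl
            (fun s k => s + PySem.List.pyGetD coef k 0 * PySem.List.pyGetD arr (j + k) 0) 0])
        out)
    []) ++ arr

-- ===== PRECONDITION & SPEC =====
-- Pre_ excludes size < 0 (A's while-loop never terminates) and size > len(arr)
-- (A raises IndexError in the first pass); A returns normally exactly on Pre_.
def Pre_sum_triangle_for_given_array (arr : List Int) (size : Int) : Prop :=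
  0 ≤ size ∧ size ≤ (arr.length : Int)
instance (arr : List Int) (size : Int) : Decidable (Pre_sum_triangle_for_given_array arr size) := by
  unfold Pre_sum_triangle_for_given_array; infer_instance

def pvWitness_sum_triangle_for_given_array : List Int × Int := ([1, 2, 3], 3)

def Spec_sum_triangle_for_given_array (arr : List Int) (size : Int) (out : List Int) : Prop := out = sum_triangle_for_given_array_alt arr size
instance (arr : List Int) (size : Int) (out : List Int) : Decidable (Spec_sum_triangle_for_given_array arr size out) := by unfold Spec_sum_triangle_for_given_array; infer_instance

-- ===== CLAIM (what is proved, stated in full; the proofs are below) =====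
def Claim_equal_sum_triangle_for_given_array : Prop := ∀ (arr : List Int) (size : Int), Dom_sum_triangle_for_given_array arr size → Pre_sum_triangle_for_given_array arr size → Spec_sum_triangle_for_given_array arr size (sum_triangle_for_given_array arr size)

-- ===== LEMMAS AND PROOFS =====

-- ---- characterization of A: its loop builds levels of iterated adjacent sums ----
def pvNextRow (row : List Int) : List Int := List.zipWith (· + ·) row row.tail

def pvLevels (row : List Int) : List (List Int) :=
  if _h : 1 < row.length then row :: pvLevels (pvNextRow row) else [row]
termination_by row.length
decreasing_by simp [pvNextRow]; omega

theorem pv_foldl_cons (l acc : List Int) :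
    l.foldl (fun a i => i :: a) acc = l.reverse ++ acc := by
  induction l generalizing acc with
  | nil => simp
  | cons x xs ih => simp [List.foldl, ih]

theorem pv_temp_eq (arr : List Int) (k : Nat) (h : k + 1 ≤ arr.length) :
    (PySem.List.pyRange 0 ((k : Int) + 1 - 1) 1).map
      (fun i => PySem.List.pyGetD arr i 0 + PySem.List.pyGetD arr (i + 1) 0)
      = pvNextRow (arr.take (k + 1)) := by
  have hr : ((k : Int) + 1 - 1) = (k : Int) := by ring
  rw [hr, PySem.List.pyRange_one]
  apply List.ext_getElem
  · simp [pvNextRow, List.length_zipWith]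
    omega
  · intro i h1 h2
    have hik : i < k := by simpa using h1
    simp only [List.getElem_map, List.getElem_range, pvNextRow, List.getElem_zipWith]
    have e1 : (0 : Int) + (i : Int) = ((i : Nat) : Int) := by ring
    have e2 : ((i : Int)) + 1 = (((i + 1 : Nat)) : Int) := by push_cast; ring
    rw [e1, PySem.List.pyGetD_natCast, e2, PySem.List.pyGetD_natCast]
    have hi1 : i < arr.length := by omega
    have hi2 : i + 1 < arr.length := by omega
    simp [hi1, hi2, List.getElem_tail, List.getElem_take]

theorem pv_loop_eq (k : Nat) :
    ∀ (arr : List Int), k ≤ arr.length →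
      pvLoopA arr k = (pvLevels (arr.take k)).reverse.flatten ++ arr.drop k := by
  induction k with
  | zero =>
    intro arr _
    simp [pvLoopA, pvLevels]
  | succ k ih =>
    intro arr h
    rw [pvLoopA]
    simp only [PySem.List.slice?_none_none_neg_one, Option.getD_some, PySem.List.insert_zero]
    rw [pv_temp_eq arr k h, pv_foldl_cons, List.reverse_reverse]
    set row := arr.take (k + 1) with hrow
    set temp := pvNextRow row with htemp
    have hlenrow : row.length = k + 1 := by
      simp [hrow]; omega
    have hlentemp : temp.length = k := by
      simp [htemp, pvNextRow, List.length_zipWith, hlenrow]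
    have ihres := ih (temp ++ arr) (by simp [hlentemp])
    rw [ihres]
    have htake : (temp ++ arr).take k = temp := by
      rw [← hlentemp, List.take_left]
    have hdrop : (temp ++ arr).drop k = arr := by
      rw [← hlentemp, List.drop_left]
    rw [htake, hdrop]
    by_cases hk : 1 ≤ k
    · have : pvLevels row = row :: pvLevels temp := by
        rw [pvLevels]
        simp [hlenrow, htemp]
        omega
      rw [this]
      simp only [List.reverse_cons, List.flatten_append, List.flatten_cons, List.flatten_nil,
        List.append_nil, List.append_assoc]
      rw [hrow, List.take_append_drop]
    · have hk0 : k = 0 := by omega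
      subst hk0
      have htnil : temp = [] := List.eq_nil_of_length_eq_zero hlentemp
      rw [htnil]
      have : pvLevels row = [row] := by
        rw [pvLevels]
        simp [hlenrow]
      rw [this]
      simp [pvLevels, hrow]
      rw [show arr.tail = arr.drop 1 from List.drop_one.symm]
      exact (List.take_append_drop 1 arr).symm

-- ---- the binomial closed form B computes ----
def pvBsum (g : Nat → Int) (lev j : Nat) : Int :=
  ∑ t ∈ Finset.range (lev + 1), (lev.choose t : Int) * g (j + t)

theorem pv_pascal (g : Nat → Int) (L j : Nat) :
    pvBsum g L j + pvBsum g L (j + 1) = pvBsum g (L + 1) j := by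
  unfold pvBsum
  rw [Finset.sum_range_succ' (fun t => ((L+1).choose t : Int) * g (j + t))]
  have h1 : (∑ t ∈ Finset.range (L+1), ((L+1).choose (t+1) : Int) * g (j + (t+1)))
      = (∑ t ∈ Finset.range (L+1), (L.choose t : Int) * g ((j+1) + t))
        + (∑ t ∈ Finset.range (L+1), (L.choose (t+1) : Int) * g (j + (t+1))) := by
    rw [← Finset.sum_add_distrib]
    apply Finset.sum_congr rfl
    intro t _
    have ht : (j+1)+t = j+(t+1) := by omega
    rw [Nat.choose_succ_succ, ht]
    push_cast
    ring
  have h2 : (∑ t ∈ Finset.range (L+1), (L.choose (t+1) : Int) * g (j + (t+1)))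
      = ∑ t ∈ Finset.range L, (L.choose (t+1) : Int) * g (j + (t+1)) := by
    rw [Finset.sum_range_succ]
    simp
  have h3 : (∑ t ∈ Finset.range (L+1), (L.choose t : Int) * g (j + t))
      = (∑ t ∈ Finset.range L, (L.choose (t+1) : Int) * g (j + (t+1))) + (L.choose 0 : Int) * g (j + 0) := by
    rw [Finset.sum_range_succ' (fun t => (L.choose t : Int) * g (j + t))]
  rw [h1, h2]
  rw [h3]
  simp
  ring

theorem pv_coefB_aux (L : Nat) : ∀ m, m ≤ L →
    (PySem.List.pyRange 1 ((m : Int) + 1) 1).foldl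
      (fun coef i =>
        coef ++ [PySem.Int.floordiv (PySem.List.pyGetD coef (-1) 0 * ((L : Int) - i + 1)) i]) [1]
      = (List.range (m + 1)).map (fun t => (L.choose t : Int)) := by
  intro m
  induction m with
  | zero =>
    intro _
    rw [show ((0 : Nat) : Int) + 1 = 1 by norm_num, PySem.List.pyRange_one_eq_nil (by omega)]
    simp [List.range_succ]
  | succ m ih =>
    intro hm
    have hcast : ((m + 1 : Nat) : Int) + 1 = ((m : Int) + 1) + 1 := by push_cast; ring
    rw [hcast, PySem.List.pyRange_one_succ_right (by omega), List.foldl_append]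
    rw [ih (by omega)]
    simp only [List.foldl_cons, List.foldl_nil]
    have hsplit : (List.range (m + 1)).map (fun t => (L.choose t : Int))
        = (List.range m).map (fun t => (L.choose t : Int)) ++ [(L.choose m : Int)] := by
      rw [List.range_succ, List.map_append]; rfl
    rw [hsplit, PySem.List.pyGetD_neg_one_append_singleton]
    have hv : PySem.Int.floordiv ((L.choose m : Int) * ((L : Int) - ((m : Int) + 1) + 1)) ((m : Int) + 1)
        = (L.choose (m + 1) : Int) := by
      have e1 : (L : Int) - ((m : Int) + 1) + 1 = ((L - m : Nat) : Int) := by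
        have : m ≤ L := by omega
        push_cast [this]; ring
      have e2 : ((m : Int) + 1) = ((m + 1 : Nat) : Int) := by push_cast; ring
      rw [e1, e2, ← Nat.cast_mul, PySem.Int.floordiv_natCast]
      rw [← Nat.choose_succ_right_eq, Nat.mul_div_cancel _ (by omega)]
    rw [hv, List.range_succ, List.map_append, ← hsplit]
    simp

theorem pv_coefB (L : Nat) :
    pvCoefB (L : Int) = (List.range (L + 1)).map (fun t => (L.choose t : Int)) :=
  pv_coefB_aux L L (le_refl L)

def pvRowOf (g : Nat → Int) (n lev : Nat) : List Int :=
  (List.range (n - lev)).map (fun j => pvBsum g lev j)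

theorem pv_nextRow_rowOf (g : Nat → Int) (n L : Nat) :
    pvNextRow (pvRowOf g n L) = pvRowOf g n (L + 1) := by
  unfold pvNextRow pvRowOf
  apply List.ext_getElem
  · simp [List.length_zipWith]; omega
  · intro i h1 h2
    simp only [List.getElem_zipWith, List.getElem_map, List.getElem_range]
    have hlen : i < n - L - 1 := by simp [List.length_zipWith] at h1; omega
    rw [List.getElem_tail]
    simp only [List.getElem_map, List.getElem_range]
    exact pv_pascal g L i

theorem pv_levels_rowOf (g : Nat → Int) :
    ∀ (d L : Nat), pvLevels (pvRowOf g (L + d + 1) L)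
      = (List.range (d + 1)).map (fun t => pvRowOf g (L + d + 1) (L + t)) := by
  intro d
  induction d with
  | zero =>
    intro L
    rw [pvLevels]
    simp [pvRowOf]
  | succ d ih =>
    intro L
    rw [pvLevels]
    have hlen : (pvRowOf g (L + (d+1) + 1) L).length = d + 2 := by
      simp [pvRowOf]; omega
    rw [dif_pos (by omega)]
    rw [pv_nextRow_rowOf]
    have ih' := ih (L + 1)
    have e : L + 1 + d + 1 = L + (d + 1) + 1 := by omega
    rw [e] at ih'
    rw [ih']
    conv_rhs => rw [List.range_succ_eq_map]
    rw [List.map_cons, List.map_map]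
    congr 1
    apply List.map_congr_left
    intro a _
    simp only [Function.comp_apply, Nat.succ_eq_add_one]
    congr 1
    omega

theorem pv_sum_map_range (f : Nat → Int) (m : Nat) :
    ((List.range m).map f).sum = ∑ t ∈ Finset.range m, f t := rfl

theorem pv_levelB (arr : List Int) (n L : Nat) :
    (PySem.List.pyRange 0 ((n : Int) - (L : Int)) 1).map (fun j =>
      (PySem.List.pyRange 0 ((L : Int) + 1) 1).foldl
        (fun s k => s + PySem.List.pyGetD (pvCoefB (L : Int)) k 0 * PySem.List.pyGetD arr (j + k) 0) 0)
    = pvRowOf (fun m => arr.getD m 0) n L := by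
  rw [pv_coefB L]
  simp only [PySem.List.pyRange_one, List.map_map, List.foldl_map]
  unfold pvRowOf
  have hto : ((n : Int) - (L : Int) - 0).toNat = n - L := by omega
  rw [hto]
  apply List.map_congr_left
  intro jn _
  simp only [Function.comp_apply]
  rw [PySem.List.foldl_add]
  have hto2 : ((L : Int) + 1 - 0).toNat = L + 1 := by omega
  rw [hto2, zero_add, pv_sum_map_range]
  unfold pvBsum
  apply Finset.sum_congr rfl
  intro t ht
  have htL : t < L + 1 := Finset.mem_range.mp ht
  have e1 : (0 : Int) + (t : Int) = ((t : Nat) : Int) := by ring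
  have e2 : (0 : Int) + (jn : Int) + (t : Int) = ((jn + t : Nat) : Int) := by push_cast; ring
  rw [e1, e2, PySem.List.pyGetD_natCast, PySem.List.pyGetD_natCast]
  rw [PySem.List.getD_map_range _ _ _ _ htL]

theorem pv_rev_range (d : Nat) :
    (List.range (d+1)).reverse = (List.range d).map (fun k => d - k) ++ [0] := by
  apply List.ext_getElem
  · simp
  · intro i h1 h2
    have hi1 : i < d + 1 := by simpa using h1
    rw [List.getElem_reverse]
    simp only [List.length_range, List.getElem_range]
    by_cases hi : i < d
    · rw [List.getElem_append_left (by simpa using hi)]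
      simp
    · have : i = d := by omega
      subst this
      rw [List.getElem_append_right (by simp)]
      simp

theorem pv_rowOf_zero (arr : List Int) (n : Nat) (h : n ≤ arr.length) :
    pvRowOf (fun m => arr.getD m 0) n 0 = arr.take n := by
  unfold pvRowOf
  apply List.ext_getElem
  · simp; omega
  · intro i h1 h2
    have hi : i < arr.length := by simp at h2; omega
    simp only [List.getElem_map, List.getElem_range, List.getElem_take]
    unfold pvBsum
    rw [Finset.sum_range_one]
    simp [List.getElem?_eq_getElem hi]

theorem pv_final (arr : List Int) (size : Int) (h0 : 0 ≤ size) (hle : size ≤ (arr.length : Int)) :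
    pvLoopA arr size.toNat =
    ((PySem.List.pyRange (size - 1) 0 (-1)).foldl
      (fun out lev =>
        let coef := pvCoefB lev
        (PySem.List.pyRange 0 (size - lev) 1).foldl
          (fun out j =>
            out ++ [(PySem.List.pyRange 0 (lev + 1) 1).foldl
              (fun s k => s + PySem.List.pyGetD coef k 0 * PySem.List.pyGetD arr (j + k) 0) 0])
          out)
      []) ++ arr := by
  by_cases hz : size = 0
  · subst hz
    rw [PySem.List.pyRange_neg_one_eq_nil (by omega)]
    simp [pvLoopA]
  · obtain ⟨d, hs⟩ : ∃ d : Nat, size = ((d + 1 : Nat) : Int) :=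
      ⟨(size - 1).toNat, by omega⟩
    subst hs
    have hdlen : d + 1 ≤ arr.length := by omega
    set g : Nat → Int := fun m => arr.getD m 0 with hg
    -- A side
    have htoNat : ((d + 1 : Nat) : Int).toNat = d + 1 := by omega
    rw [htoNat, pv_loop_eq (d + 1) arr hdlen]
    have hlev := pv_levels_rowOf g d 0
    simp only [Nat.zero_add] at hlev
    rw [show arr.take (d + 1) = pvRowOf g (d + 1) 0 from (pv_rowOf_zero arr (d + 1) hdlen).symm,
        hlev, ← List.map_reverse, pv_rev_range, List.map_append, List.flatten_append]
    -- B side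
    rw [PySem.List.pyRange_neg_one]
    have ht2 : (((d + 1 : Nat) : Int) - 1 - 0).toNat = d := by omega
    rw [ht2]
    rw [PySem.List.foldl_congr_mem (g := fun out lev => out ++
        (PySem.List.pyRange 0 (((d + 1 : Nat) : Int) - lev) 1).map (fun j =>
          (PySem.List.pyRange 0 (lev + 1) 1).foldl
            (fun s k => s + PySem.List.pyGetD (pvCoefB lev) k 0 * PySem.List.pyGetD arr (j + k) 0) 0))
      (h := by
        intro acc lev _
        dsimp only
        exact PySem.List.foldl_append_singleton_eq_map _ _ _)]
    rw [PySem.List.foldl_append_eq_flatMap, List.flatMap_map]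
    simp only [List.nil_append, List.flatMap]
    have hbody : ∀ a ∈ List.range d,
        List.map
          (fun j => List.foldl
            (fun s k => s + PySem.List.pyGetD (pvCoefB (((d + 1 : Nat) : Int) - 1 - (a : Int))) k 0
              * PySem.List.pyGetD arr (j + k) 0) 0
            (PySem.List.pyRange 0 (((d + 1 : Nat) : Int) - 1 - (a : Int) + 1) 1))
          (PySem.List.pyRange 0 (((d + 1 : Nat) : Int) - (((d + 1 : Nat) : Int) - 1 - (a : Int))) 1)
        = pvRowOf g (d + 1) (d - a) := by
      intro a ha
      have had : a < d := List.mem_range.mp ha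
      have e : ((d + 1 : Nat) : Int) - 1 - (a : Int) = ((d - a : Nat) : Int) := by
        push_cast [Nat.le_of_lt had]; ring
      rw [e]
      exact pv_levelB arr (d + 1) (d - a)
    rw [List.map_congr_left hbody]
    simp only [List.map_map]
    rw [List.append_assoc]
    congr 1
    simp only [List.map_cons, List.map_nil, List.flatten_cons, List.flatten_nil, List.append_nil]
    rw [pv_rowOf_zero arr (d + 1) hdlen, List.take_append_drop]

-- ===== VERDICT (by name: the statement is the Claim_ definition above) =====
theorem sum_triangle_for_given_array_spec : Claim_equal_sum_triangle_for_given_array := by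
  intro arr size _hdom hpre
  obtain ⟨h0, hle⟩ := hpre
  unfold Spec_sum_triangle_for_given_array sum_triangle_for_given_array
    sum_triangle_for_given_array_alt
  exact pv_final arr size h0 hle
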